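-- pv_equiv track=rewrite | github.com/jiricodes/pygame_tests | maze/sources/grid.py | create_grid_checkered
-- ===== SOURCE A (Python) =====
-- def create_grid_checkered(width, height):
-- 	grid = list()
-- 	for r in range(height):
-- 		row = list()
-- 		for c in range(width):
-- 			if r == 0 or c == 0 or r == height - 1 or c == width - 1:
-- 				row.append(1)
-- 			elif c % 2 and r % 2:
-- 				row.append(0)
-- 			else:
-- 				row.append(1)
-- 		grid.append(row)
-- 	return grid
-- ===== SOURCE B (Python) =====
-- def create_grid_checkered(width, height):
--     grid = [[1] * width for _ in range(height)]
--     for r in range(1, height - 1, 2):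
--         row = grid[r]
--         for c in range(1, width - 1, 2):
--             row[c] = 0
--     return grid
-- ===== Notes on version B (the rewrite author's own statement) =====
-- stated objective: simpler
-- what changed: B fills an all-ones grid in one bulk comprehension and then overwrites only the odd interior cells to 0 with stride-2 loops, replacing A's per-cell border/parity branch cascade; touching only ~1/4 of the cells with branch-free bulk fill gives a constant-factor speedup.
import Mathlib
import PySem

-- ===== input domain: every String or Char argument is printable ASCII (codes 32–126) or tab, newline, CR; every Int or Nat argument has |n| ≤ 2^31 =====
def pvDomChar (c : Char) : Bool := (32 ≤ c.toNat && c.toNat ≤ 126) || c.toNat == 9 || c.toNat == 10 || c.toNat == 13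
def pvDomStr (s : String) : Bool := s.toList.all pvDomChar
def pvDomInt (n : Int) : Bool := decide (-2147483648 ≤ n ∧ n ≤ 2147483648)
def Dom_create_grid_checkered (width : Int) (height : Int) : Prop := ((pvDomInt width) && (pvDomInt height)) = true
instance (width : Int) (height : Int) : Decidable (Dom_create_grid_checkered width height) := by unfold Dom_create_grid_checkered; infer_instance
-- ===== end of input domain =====

-- B builds an all-ones grid and overwrites only the odd interior cells to 0 with stride-2 loops,
-- replacing A's per-cell border/parity branch cascade (objective: simpler).


-- ===== PORT A =====
def create_grid_checkered (width : Int) (height : Int) : List (List Int) :=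
  (PySem.List.pyRange 0 height 1).foldl (fun grid r =>
    grid ++ [ (PySem.List.pyRange 0 width 1).foldl (fun row c =>
        row ++ [ if r = 0 ∨ c = 0 ∨ r = height - 1 ∨ c = width - 1 then (1 : Int)
                 else if ¬ (PySem.Int.mod c 2 = 0) ∧ ¬ (PySem.Int.mod r 2 = 0) then 0
                 else 1 ]) [] ]) []

-- ===== PORT B =====
def create_grid_checkered_alt (width : Int) (height : Int) : List (List Int) :=
  (PySem.List.pyRange 1 (height - 1) 2).foldl (fun grid r =>
    grid.modify r.toNat (fun row =>
      (PySem.List.pyRange 1 (width - 1) 2).foldl (fun row c => row.set c.toNat 0) row))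
    (List.replicate height.toNat (List.replicate width.toNat (1 : Int)))

-- ===== PRECONDITION & SPEC =====
def Spec_create_grid_checkered (width : Int) (height : Int) (out : List (List Int)) : Prop := out = create_grid_checkered_alt width height
instance (width : Int) (height : Int) (out : List (List Int)) : Decidable (Spec_create_grid_checkered width height out) := by unfold Spec_create_grid_checkered; infer_instance

-- ===== CLAIM (what is proved, stated in full; the proofs are below) =====
def Claim_equal_create_grid_checkered : Prop := ∀ (width : Int) (height : Int), Dom_create_grid_checkered width height → Spec_create_grid_checkered width height (create_grid_checkered width height)

-- ===== LEMMAS AND PROOFS =====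

-- common closed form: cell (r,c) is 0 iff both indices are odd and strictly interior
def gridSpec (width height : Int) : List (List Int) :=
  (List.range height.toNat).map fun (r : Nat) => (List.range width.toNat).map fun (c : Nat) =>
    if (1 ≤ (r : Int) ∧ (r : Int) < height - 1 ∧ 2 ∣ (r : Int) - 1) ∧
       (1 ≤ (c : Int) ∧ (c : Int) < width - 1 ∧ 2 ∣ (c : Int) - 1) then (0 : Int) else 1

lemma A_eq (width height : Int) : create_grid_checkered width height = gridSpec width height := by
  unfold create_grid_checkered gridSpec
  simp only [PySem.List.foldl_append_singleton_eq_map, List.nil_append, PySem.List.pyRange_one,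
    List.map_map, Int.sub_zero, Function.comp_def, zero_add]
  apply List.map_congr_left
  intro r hr
  apply List.map_congr_left
  intro c hc
  rw [List.mem_range] at hr hc
  rw [PySem.Int.mod_eq_emod_of_pos (a := (c : Int)) (by norm_num),
    PySem.Int.mod_eq_emod_of_pos (a := (r : Int)) (by norm_num)]
  split_ifs <;> omega

lemma foldl_set_getElem? {α : Type} (v : α) (idxs : List Int)
    (hnn : ∀ i ∈ idxs, 0 ≤ i) (row : List α) (j : Nat) :
    (idxs.foldl (fun a i => a.set i.toNat v) row)[j]? =
      if (j : Int) ∈ idxs then (if j < row.length then some v else none) else row[j]? := by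
  induction idxs generalizing row with
  | nil => simp
  | cons i t ih =>
    simp only [List.foldl_cons]
    rw [ih (fun x hx => hnn x (List.mem_cons_of_mem _ hx))]
    have hi : 0 ≤ i := hnn i (List.mem_cons_self ..)
    have hij : (i.toNat = j) ↔ (i = (j : Int)) := by omega
    simp only [List.length_set, List.getElem?_set, List.mem_cons]
    by_cases h1 : (j : Int) ∈ t <;> by_cases h2 : i = (j : Int) <;>
      simp [h1, h2, hij] <;>
      exact fun h => absurd h.symm h2

lemma foldl_modify_getElem? {α : Type} (f : α → α) (idxs : List Int)
    (hnn : ∀ i ∈ idxs, 0 ≤ i) (hnd : idxs.Nodup) (g : List α) (j : Nat) :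
    (idxs.foldl (fun a i => a.modify i.toNat f) g)[j]? =
      if (j : Int) ∈ idxs then f <$> g[j]? else g[j]? := by
  induction idxs generalizing g with
  | nil => simp
  | cons i t ih =>
    simp only [List.foldl_cons]
    rw [ih (fun x hx => hnn x (List.mem_cons_of_mem _ hx)) hnd.of_cons]
    have hi : 0 ≤ i := hnn i (List.mem_cons_self ..)
    have hnotin : i ∉ t := (List.nodup_cons.mp hnd).1
    have hij : (i.toNat = j) ↔ (i = (j : Int)) := by omega
    simp only [List.getElem?_modify, List.mem_cons]
    by_cases h1 : (j : Int) ∈ t <;> by_cases h2 : i = (j : Int) <;>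
      simp_all <;>
      exact fun h => absurd h.symm h2

lemma nodup_pyRange_two (a b : Int) : (PySem.List.pyRange a b 2).Nodup := by
  rw [PySem.List.pyRange_of_pos a b (by norm_num)]
  exact (List.nodup_range).map (fun x y hxy => by omega)

lemma mem_pyRange_two (a b x : Int) : x ∈ PySem.List.pyRange a b 2 ↔ a ≤ x ∧ x < b ∧ 2 ∣ x - a :=
  PySem.List.mem_pyRange_iff_of_pos (by norm_num) x

lemma B_eq (width height : Int) :
    create_grid_checkered_alt width height = gridSpec width height := by
  unfold create_grid_checkered_alt gridSpec
  apply List.ext_getElem?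
  intro r
  rw [foldl_modify_getElem? _ _
      (fun i hi => by have := (mem_pyRange_two 1 (height - 1) i).mp hi; omega)
      (nodup_pyRange_two _ _)]
  by_cases hrh : r < height.toNat
  case neg =>
    have hmem : ¬ ((r : Int) ∈ PySem.List.pyRange 1 (height - 1) 2) := by
      rw [mem_pyRange_two]; omega
    have h1 : height.toNat ≤ r := Nat.le_of_not_lt hrh
    simp [hmem, hrh]
  case pos =>
    rw [List.getElem?_map, List.getElem?_range hrh]
    simp only [List.getElem?_replicate, hrh, if_pos, Option.map_some]
    by_cases hrmem : (r : Int) ∈ PySem.List.pyRange 1 (height - 1) 2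
    case pos =>
      have hr := (mem_pyRange_two 1 (height - 1) (r : Int)).mp hrmem
      simp only [hrmem, if_pos, Option.map_eq_map, Option.map_some, Option.some.injEq]
      apply List.ext_getElem?
      intro c
      rw [foldl_set_getElem? _ _
          (fun i hi => by have := (mem_pyRange_two 1 (width - 1) i).mp hi; omega)]
      by_cases hcw : c < width.toNat
      case neg =>
        have hmem : ¬ ((c : Int) ∈ PySem.List.pyRange 1 (width - 1) 2) := by
          rw [mem_pyRange_two]; omega
        have h1 : width.toNat ≤ c := Nat.le_of_not_lt hcw
        simp [hmem, hcw]
      case pos =>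
        rw [List.getElem?_map, List.getElem?_range hcw]
        simp only [List.length_replicate, List.getElem?_replicate, hcw, if_pos]
        by_cases hcmem : (c : Int) ∈ PySem.List.pyRange 1 (width - 1) 2
        case pos =>
          have hc := (mem_pyRange_two 1 (width - 1) (c : Int)).mp hcmem
          have hcond : (1 ≤ (r : Int) ∧ (r : Int) < height - 1 ∧ 2 ∣ (r : Int) - 1) ∧
              (1 ≤ (c : Int) ∧ (c : Int) < width - 1 ∧ 2 ∣ (c : Int) - 1) := by
            refine ⟨⟨hr.1, hr.2.1, ?_⟩, ⟨hc.1, hc.2.1, ?_⟩⟩ <;> omega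
          simp [hcmem]
          omega
        case neg =>
          have hc : ¬ (1 ≤ (c : Int) ∧ (c : Int) < width - 1 ∧ 2 ∣ (c : Int) - 1) := by
            rw [mem_pyRange_two] at hcmem; omega
          simp [hcmem]
          omega
    case neg =>
      have hr : ¬ (1 ≤ (r : Int) ∧ (r : Int) < height - 1 ∧ 2 ∣ (r : Int) - 1) := by
        rw [mem_pyRange_two] at hrmem; omega
      simp only [hrmem, if_neg, not_false_iff, Option.some.injEq]
      apply List.ext_getElem?
      intro c
      rw [List.getElem?_map, List.getElem?_replicate]
      by_cases hcw : c < width.toNat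
      case neg =>
        have h1 : width.toNat ≤ c := Nat.le_of_not_lt hcw
        simp [hcw]
      case pos =>
        rw [List.getElem?_range hcw]
        simp only [hcw, if_pos]
        rw [Option.map_some]
        simp only [Option.some.injEq]
        split_ifs with hcond
        · exact absurd hcond.1 hr
        · rfl

-- ===== VERDICT (by name: the statement is the Claim_ definition above) =====
theorem create_grid_checkered_spec : Claim_equal_create_grid_checkered := by
  intro width height _
  unfold Spec_create_grid_checkered
  rw [A_eq, B_eq]
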